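-- pv_equiv track=rewrite | github.com/AdamZhouSE/pythonHomework | Code/CodeRecords/2876/60643/285546.py | solution
-- ===== SOURCE A (Python) =====
-- def solution(data):
--     cnt=0
--     rec=[]
--     for i in range(1,len(data)-1):
--         if data[i-1]==1 and data[i]==0 and data[i+1]==1:
--             rec.append(i)
--             cnt+=1
--     for i in range(len(rec)-1):
--         if rec[i]+2==rec[i+1]:
--             cnt-=1
--     return cnt
-- ===== SOURCE B (Python) =====
-- def solution(data):
--     # single pass: remember only the index of the previous 1,0,1 match
--     cnt = 0
--     last = None
--     for i in range(1, len(data) - 1):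
--         if data[i-1] == 1 and data[i] == 0 and data[i+1] == 1:
--             if last is None or last + 2 != i:
--                 cnt += 1
--             last = i
--     return cnt
-- ===== Notes on version B (the rewrite author's own statement) =====
-- stated objective: simpler
-- what changed: Fused A's two passes (collect all match indices in a list, then scan the list for adjacent pairs at distance 2) into one pass that keeps only the previous match index and skips counting a match exactly 2 past it.
import Mathlib
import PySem

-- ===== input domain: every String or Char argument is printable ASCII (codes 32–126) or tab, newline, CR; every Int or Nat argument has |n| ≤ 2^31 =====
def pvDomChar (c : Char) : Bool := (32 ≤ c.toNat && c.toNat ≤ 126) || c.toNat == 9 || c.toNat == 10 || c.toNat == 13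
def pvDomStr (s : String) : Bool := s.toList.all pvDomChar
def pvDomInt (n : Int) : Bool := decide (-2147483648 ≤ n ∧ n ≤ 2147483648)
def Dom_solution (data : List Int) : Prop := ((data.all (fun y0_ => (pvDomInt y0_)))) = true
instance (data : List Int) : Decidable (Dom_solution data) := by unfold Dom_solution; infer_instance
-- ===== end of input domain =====

-- B fuses A's two passes into one pass that remembers only the previous match index (objective: simpler).

-- ===== PORT A =====
def solution (data : List Int) : Int :=
  let st := (PySem.List.pyRange 1 ((data.length : Int) - 1) 1).foldl
    (fun (st : Int × List Int) i =>
      if PySem.List.pyGetD data (i-1) 0 = 1 ∧ PySem.List.pyGetD data i 0 = 0 ∧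
         PySem.List.pyGetD data (i+1) 0 = 1
      then (st.1 + 1, st.2 ++ [i]) else st) (0, [])
  let cnt := st.1
  let r := st.2
  (PySem.List.pyRange 0 ((r.length : Int) - 1) 1).foldl
    (fun c i => if PySem.List.pyGetD r i 0 + 2 = PySem.List.pyGetD r (i+1) 0
                then c - 1 else c) cnt

-- ===== PORT B =====
def solution_alt (data : List Int) : Int :=
  let st := (PySem.List.pyRange 1 ((data.length : Int) - 1) 1).foldl
    (fun (st : Int × Option Int) i =>
      if PySem.List.pyGetD data (i-1) 0 = 1 ∧ PySem.List.pyGetD data i 0 = 0 ∧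
         PySem.List.pyGetD data (i+1) 0 = 1
      then ((match st.2 with
             | none => st.1 + 1
             | some last => if last + 2 = i then st.1 else st.1 + 1), some i)
      else st) (0, none)
  st.1

-- ===== PRECONDITION & SPEC =====
def Spec_solution (data : List Int) (out : Int) : Prop := out = solution_alt data
instance (data : List Int) (out : Int) : Decidable (Spec_solution data out) := by unfold Spec_solution; infer_instance

-- ===== CLAIM (what is proved, stated in full; the proofs are below) =====
def Claim_equal_solution : Prop := ∀ (data : List Int), Dom_solution data → Spec_solution data (solution data)

-- ===== LEMMAS AND PROOFS =====

-- number of adjacent pairs at distance exactly 2, starting from previous element x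
def adjFrom (x : Int) : List Int → Int
  | [] => 0
  | y :: t => (if x + 2 = y then 1 else 0) + adjFrom y t

def adjCount : List Int → Int
  | [] => 0
  | x :: t => adjFrom x t

-- B's in-loop counting, abstracted
def bcount : Option Int → List Int → Int
  | _, [] => 0
  | none, x :: t => 1 + bcount (some x) t
  | some l, x :: t => (if l + 2 = x then 0 else 1) + bcount (some x) t

lemma bcount_some_eq (t : List Int) : ∀ x, bcount (some x) t + adjFrom x t = (t.length : Int) := by
  induction t with
  | nil => intro x; simp [bcount, adjFrom]
  | cons y t ih =>
    intro x
    simp only [bcount, adjFrom, List.length_cons]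
    have := ih y
    split_ifs <;> push_cast <;> omega

lemma bcount_none_eq (r : List Int) : bcount none r = (r.length : Int) - adjCount r := by
  cases r with
  | nil => simp [bcount, adjCount]
  | cons x t =>
    have := bcount_some_eq t x
    simp only [bcount, adjCount, List.length_cons]
    push_cast
    omega

-- A's first loop: a filter with a counter
lemma loopA (p : Int → Prop) [DecidablePred p] (l : List Int) :
    ∀ (c : Int) (r : List Int),
      (l.foldl (fun (st : Int × List Int) i => if p i then (st.1 + 1, st.2 ++ [i]) else st) (c, r))
        = (c + ((l.filter (fun i => decide (p i))).length : Int),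
           r ++ l.filter (fun i => decide (p i))) := by
  induction l with
  | nil => intro c r; simp
  | cons x l ih =>
    intro c r
    by_cases h : p x
    · simp only [List.foldl_cons, h, if_true, decide_true, List.filter_cons, ih]
      simp
      omega
    · simp only [List.foldl_cons, h, if_false, decide_false, List.filter_cons, ih]
      simp

-- A's second loop over Nat range indexing
lemma loop2_nat (r : List Int) : ∀ (c : Int),
    (List.range (r.length - 1)).foldl
      (fun c k => if r.getD k 0 + 2 = r.getD (k+1) 0 then c - 1 else c) c
      = c - adjCount r := by
  induction r with
  | nil => intro c; simp [adjCount]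
  | cons x t ih =>
    intro c
    cases t with
    | nil => simp [adjCount, adjFrom]
    | cons y t' =>
      have hlen : (x :: y :: t').length - 1 = (y :: t').length - 1 + 1 := by simp
      rw [hlen, List.range_succ_eq_map, List.foldl_cons, List.foldl_map]
      show (List.range ((y :: t').length - 1)).foldl
            (fun c k => if (y :: t').getD k 0 + 2 = (y :: t').getD (k+1) 0 then c - 1 else c)
            (if x + 2 = y then c - 1 else c) = c - adjCount (x :: y :: t')
      rw [ih]
      simp only [adjCount, adjFrom]
      split_ifs <;> omega

-- bridge: A's second loop over pyRange equals the Nat-range version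
lemma loop2 (r : List Int) (c : Int) :
    (PySem.List.pyRange 0 ((r.length : Int) - 1) 1).foldl
      (fun c i => if PySem.List.pyGetD r i 0 + 2 = PySem.List.pyGetD r (i+1) 0 then c - 1 else c) c
      = c - adjCount r := by
  rw [PySem.List.pyRange_one, List.foldl_map]
  have h1 : (((r.length : Int) - 1) - 0).toNat = r.length - 1 := by omega
  rw [h1]
  have hfun : (fun (a : Int) (b : Nat) =>
        if PySem.List.pyGetD r (0 + (b : Int)) 0 + 2 = PySem.List.pyGetD r (0 + (b : Int) + 1) 0
        then a - 1 else a)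
      = (fun (c : Int) (k : Nat) => if r.getD k 0 + 2 = r.getD (k+1) 0 then c - 1 else c) := by
    funext a b
    have h2 : (0 : Int) + (b : Int) = ((b : Nat) : Int) := by ring
    have h3 : (0 : Int) + (b : Int) + 1 = (((b + 1 : Nat)) : Int) := by push_cast; ring
    rw [h3, h2, PySem.List.pyGetD_natCast, PySem.List.pyGetD_natCast]
  rw [hfun, loop2_nat]

-- B's loop: fst of the fold is bcount over the filtered list
lemma loopB (p : Int → Prop) [DecidablePred p] (l : List Int) :
    ∀ (c : Int) (last : Option Int),
      (l.foldl (fun (st : Int × Option Int) i =>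
          if p i then ((match st.2 with
                        | none => st.1 + 1
                        | some last => if last + 2 = i then st.1 else st.1 + 1), some i)
          else st) (c, last)).1
        = c + bcount last (l.filter (fun i => decide (p i))) := by
  induction l with
  | nil => intro c last; simp [bcount]
  | cons x l ih =>
    intro c last
    simp only [List.foldl_cons]
    by_cases h : p x
    · rw [if_pos h]
      cases last with
      | none => simp [h, ih, bcount]; omega
      | some lv =>
        simp only [ih]
        simp [h, bcount]
        split_ifs <;> omega
    · rw [if_neg h, ih]
      simp [h]

-- combined final step, stated over an arbitrary match-index list R
lemma finalAux (R : List Int) :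
    (PySem.List.pyRange 0 ((R.length : Int) - 1) 1).foldl
      (fun c i => if PySem.List.pyGetD R i 0 + 2 = PySem.List.pyGetD R (i+1) 0 then c - 1 else c)
      ((R.length : Int)) = bcount none R := by
  rw [loop2, bcount_none_eq]

-- ===== VERDICT (by name: the statement is the Claim_ definition above) =====
theorem solution_spec : Claim_equal_solution := by
  intro data _
  unfold Spec_solution solution solution_alt
  simp only
  rw [loopA (fun i => PySem.List.pyGetD data (i-1) 0 = 1 ∧ PySem.List.pyGetD data i 0 = 0 ∧
         PySem.List.pyGetD data (i+1) 0 = 1)]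
  rw [loopB (fun i => PySem.List.pyGetD data (i-1) 0 = 1 ∧ PySem.List.pyGetD data i 0 = 0 ∧
         PySem.List.pyGetD data (i+1) 0 = 1)]
  simp only [zero_add, List.nil_append]
  exact finalAux _
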